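-- pv_equiv track=rewrite | github.com/luisastellet/laboratorio-prog1 | Lab7/lab7-4.py | tabuleiro
-- ===== SOURCE A (Python) =====
-- def tabuleiro (matriz, numero):
--     #assumindo que toda fileira terá o mesmo número de cadeiras, por ser um cinema e todos os exemplos dados mostram isso
--     casos = 0
--     #criando um for para percorrer todas as linhas da matriz
--     for i in range(len(matriz)):
--         #criando um for para analisar cada poltrona
--         for x in range(len(matriz[i])-numero+1):
--             verificador = True
--             #um for interno que analisa a quantidade de cadeiras correspondendo ao numero pedido
--             for y in range(numero):
--                 if matriz[i][x+y] != 0: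
--                     verificador = False
--             #se ocorrer um caso em que caibam as pessoas juntas, o contador de casos aumenta 1
--             if verificador == True:
--                 casos += 1
--     return casos
-- ===== SOURCE B (Python) =====
-- def tabuleiro(matriz, numero):
--     # one left-to-right pass per row: keep the length of the current run of
--     # zeros; every position where the run reaches `numero` ends one all-zero
--     # window of that length.
--     casos = 0
--     for fileira in matriz:
--         zeros = 0
--         for poltrona in fileira:
--             zeros = zeros + 1 if poltrona == 0 else 0
--             if zeros >= numero:
--                 casos += 1
--     return casos
-- ===== Notes on version B (the rewrite author's own statement) =====
-- stated objective: alternative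
-- what changed: Replaces A's per-window inner re-scan (for every start x, re-check all numero seats) by a single left-to-right pass per row that maintains the length of the current run of zeros and counts each position where that run reaches numero; Pre_ restricts to the natural domain numero >= 1, since for non-positive window lengths A's vacuous inner loop counts len(row)-numero+1 'windows' per row, an accident outside the function's purpose.
-- outside the precondition, e.g. on tabuleiro([[0]], 0): A returns 2, B returns 1; on tabuleiro([[1, 0]], -1): A returns 4, B returns 2
import Mathlib
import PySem

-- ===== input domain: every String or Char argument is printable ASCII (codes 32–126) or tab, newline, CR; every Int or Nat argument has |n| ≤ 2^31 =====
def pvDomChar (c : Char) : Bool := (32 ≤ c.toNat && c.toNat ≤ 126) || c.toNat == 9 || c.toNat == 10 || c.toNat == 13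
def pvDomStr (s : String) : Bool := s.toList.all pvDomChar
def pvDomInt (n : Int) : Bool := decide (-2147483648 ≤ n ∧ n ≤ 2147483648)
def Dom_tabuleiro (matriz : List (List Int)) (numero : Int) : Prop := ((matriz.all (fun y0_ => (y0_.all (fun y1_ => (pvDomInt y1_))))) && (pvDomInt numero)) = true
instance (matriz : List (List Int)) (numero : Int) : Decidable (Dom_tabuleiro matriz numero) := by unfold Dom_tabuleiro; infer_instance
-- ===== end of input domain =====

-- B replaces A's per-window re-scan by a single pass per row keeping a running
-- trailing-zero-run length (objective: alternative algorithm, one pass per row instead of a scan per window).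

-- ===== PORT A =====
def tabuleiro (matriz : List (List Int)) (numero : Int) : Int :=
  (PySem.List.pyRange 0 (matriz.length : Int) 1).foldl (fun casos i =>
    let fileira := PySem.List.pyGetD matriz i []
    (PySem.List.pyRange 0 ((fileira.length : Int) - numero + 1) 1).foldl (fun casos x =>
      let verificador := (PySem.List.pyRange 0 numero 1).foldl (fun v y =>
        if PySem.List.pyGetD fileira (x + y) 0 ≠ 0 then false else v) true
      if verificador = true then casos + 1 else casos) casos) 0

-- ===== PORT B =====
def tabuleiro_alt (matriz : List (List Int)) (numero : Int) : Int :=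
  matriz.foldl (fun casos fileira =>
    (fileira.foldl (fun (p : Int × Int) poltrona =>
      let zeros : Int := if poltrona = 0 then p.1 + 1 else 0
      (zeros, if zeros ≥ numero then p.2 + 1 else p.2)) ((0 : Int), casos)).2) 0

-- ===== PRECONDITION & SPEC =====
-- Pre_ restricts to the function's natural domain (a window length of at least one seat):
-- for numero ≤ 0 A's vacuous inner loop counts len(row)-numero+1 "windows" per row,
-- an accident of the empty range, not part of the function's purpose.
def Pre_tabuleiro (matriz : List (List Int)) (numero : Int) : Prop := 1 ≤ numero
instance (matriz : List (List Int)) (numero : Int) : Decidable (Pre_tabuleiro matriz numero) := by unfold Pre_tabuleiro; infer_instance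
def pvWitness_tabuleiro : List (List Int) × Int := ([[0, 0], [1, 0]], 2)
def Spec_tabuleiro (matriz : List (List Int)) (numero : Int) (out : Int) : Prop := out = tabuleiro_alt matriz numero
instance (matriz : List (List Int)) (numero : Int) (out : Int) : Decidable (Spec_tabuleiro matriz numero out) := by unfold Spec_tabuleiro; infer_instance

-- ===== CLAIM (what is proved, stated in full; the proofs are below) =====
def Claim_equal_tabuleiro : Prop := ∀ (matriz : List (List Int)) (numero : Int), Dom_tabuleiro matriz numero → Pre_tabuleiro matriz numero → Spec_tabuleiro matriz numero (tabuleiro matriz numero)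

-- ===== LEMMAS AND PROOFS =====
def pvZwin (r : List Int) (n x : Int) : Bool :=
  !((PySem.List.pyRange 0 n 1).any (fun y => decide (PySem.List.pyGetD r (x + y) 0 ≠ 0)))

def pvTz (r : List Int) : Nat := (r.reverse.takeWhile (fun a => a == 0)).length

theorem pvZwin_eq_true_iff (r : List Int) (n x : Int) :
    pvZwin r n x = true ↔ ∀ y : Int, 0 ≤ y → y < n → PySem.List.pyGetD r (x + y) 0 = 0 := by
  simp [pvZwin, PySem.List.mem_pyRange_one]

theorem pv_take_all_eq_takeWhile {α : Type} (l : List α) (p : α → Bool) (m : Nat) (hm : m ≤ l.length) :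
    (l.take m).all p = decide (m ≤ (l.takeWhile p).length) := by
  induction l generalizing m with
  | nil => simp at hm; simp [hm]
  | cons a t ih =>
    cases m with
    | zero => simp
    | succ k =>
      simp only [List.take_succ_cons, List.all_cons, List.takeWhile_cons]
      by_cases hp : p a = true
      · simp [hp, ih k (by simpa using hm)]
      · simp [hp]

theorem pvTz_le (r : List Int) : pvTz r ≤ r.length := by
  have := (List.takeWhile_sublist (p := fun a : Int => a == 0) (l := r.reverse)).length_le
  simpa [pvTz] using this

theorem pvZwin_suffix (s : List Int) (n : Int) (hn : 1 ≤ n) (hns : n ≤ (s.length : Int)) :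
    pvZwin s n ((s.length : Int) - n) = decide (n ≤ (pvTz s : Int)) := by
  set m : Nat := n.toNat with hmdef
  have hn' : (m : Int) = n := by omega
  have hmlen : m ≤ s.length := by omega
  have hdropall : (s.drop (s.length - m)).all (fun a => a == 0) = decide (n ≤ (pvTz s : Int)) := by
    have h1 : (s.drop (s.length - m)).all (fun a => a == (0:Int))
        = (s.reverse.take m).all (fun a => a == 0) := by
      rw [← List.all_reverse, List.reverse_drop]
      have hmm : s.length - (s.length - m) = m := by omega
      rw [hmm]
    rw [h1, pv_take_all_eq_takeWhile _ _ m (by simpa using hmlen)]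
    simp only [pvTz]
    rw [decide_eq_decide]
    omega
  rw [← hdropall, Bool.eq_iff_iff, pvZwin_eq_true_iff, List.all_eq_true]
  constructor
  · intro h a ha
    rw [List.mem_iff_getElem] at ha
    obtain ⟨i, hi, hval⟩ := ha
    have hi' : i < m := by simp [List.length_drop] at hi; omega
    have := h (i : Int) (by positivity) (by omega)
    have hcast : ((s.length : Int) - n + i) = ((s.length - m + i : Nat) : Int) := by omega
    rw [hcast, PySem.List.pyGetD_natCast, List.getD_eq_getElem _ _ (by omega)] at this
    rw [List.getElem_drop] at hval
    simp only [beq_iff_eq]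
    rw [← hval]
    exact this
  · intro h y h0 h1
    have hcast : ((s.length : Int) - n + y) = ((s.length - m + y.toNat : Nat) : Int) := by omega
    rw [hcast, PySem.List.pyGetD_natCast, List.getD_eq_getElem _ _ (by omega)]
    have hmem : s[s.length - m + y.toNat]'(by omega) ∈ s.drop (s.length - m) := by
      rw [List.mem_iff_getElem]
      exact ⟨y.toNat, by simp [List.length_drop]; omega, by rw [List.getElem_drop]⟩
    simpa using h _ hmem

def pvW (r : List Int) (n : Int) : Nat :=
  (PySem.List.pyRange 0 ((r.length : Int) - n + 1) 1).countP (pvZwin r n)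

theorem pvTz_append (r : List Int) (v : Int) :
    pvTz (r ++ [v]) = if v = 0 then pvTz r + 1 else 0 := by
  by_cases h : v = 0 <;> simp [pvTz, h]

theorem pvZwin_extend (r : List Int) (v : Int) (n x : Int) (h0 : 0 ≤ x)
    (hx : x + n ≤ (r.length : Int)) :
    pvZwin (r ++ [v]) n x = pvZwin r n x := by
  rw [Bool.eq_iff_iff, pvZwin_eq_true_iff, pvZwin_eq_true_iff]
  have key : ∀ y : Int, 0 ≤ y → y < n →
      PySem.List.pyGetD (r ++ [v]) (x + y) 0 = PySem.List.pyGetD r (x + y) 0 := by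
    intro y h1 h2
    have hlt : x + y < (r.length : Int) := by omega
    rw [PySem.List.pyGetD_eq_getElem (r ++ [v]) 0 (by omega) (by simp; omega),
        PySem.List.pyGetD_eq_getElem r 0 (by omega) (by omega)]
    exact List.getElem_append_left (by omega)
  constructor
  · intro h y h1 h2; rw [← key y h1 h2]; exact h y h1 h2
  · intro h y h1 h2; rw [key y h1 h2]; exact h y h1 h2

theorem pvW_append (r : List Int) (v : Int) (n : Int) (hn : 1 ≤ n) :
    (pvW (r ++ [v]) n : Int)
      = (pvW r n : Int) + (if n ≤ (pvTz (r ++ [v]) : Int) then 1 else 0) := by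
  by_cases hL : n ≤ (r.length : Int) + 1
  · have hlen : ((r ++ [v]).length : Int) = (r.length : Int) + 1 := by simp
    have hsplit : PySem.List.pyRange 0 (((r ++ [v]).length : Int) - n + 1) 1
        = PySem.List.pyRange 0 ((r.length : Int) - n + 1) 1 ++ [(r.length : Int) - n + 1] := by
      rw [hlen]
      have : (r.length : Int) + 1 - n + 1 = ((r.length : Int) - n + 1) + 1 := by ring
      rw [this]
      exact PySem.List.pyRange_one_succ_right (a := 0) (b := (r.length : Int) - n + 1) (by omega)
    rw [pvW, hsplit, List.countP_append]
    have hcongr : (PySem.List.pyRange 0 ((r.length : Int) - n + 1) 1).countP (pvZwin (r ++ [v]) n)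
        = (PySem.List.pyRange 0 ((r.length : Int) - n + 1) 1).countP (pvZwin r n) := by
      apply List.countP_congr
      intro x hx
      rw [PySem.List.mem_pyRange_one] at hx
      rw [pvZwin_extend r v n x hx.1 (by omega)]
    have hsuffix : pvZwin (r ++ [v]) n ((r.length : Int) - n + 1)
        = decide (n ≤ (pvTz (r ++ [v]) : Int)) := by
      have : (r.length : Int) - n + 1 = (((r ++ [v]).length : Int)) - n := by simp; ring
      rw [this]
      exact pvZwin_suffix (r ++ [v]) n hn (by simp; omega)
    rw [hcongr, List.countP_singleton, hsuffix]
    by_cases hz : n ≤ (pvTz (r ++ [v]) : Int) <;> simp [hz, pvW]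
  · have h1 : pvW (r ++ [v]) n = 0 := by
      rw [pvW, PySem.List.pyRange_one_eq_nil (by simp; omega)]
      rfl
    have h2 : pvW r n = 0 := by
      rw [pvW, PySem.List.pyRange_one_eq_nil (by omega)]
      rfl
    have h3 : ¬ n ≤ (pvTz (r ++ [v]) : Int) := by
      have := pvTz_le (r ++ [v])
      simp at this
      omega
    simp [h1, h2, h3]

theorem pv_foldB (n : Int) (hn : 1 ≤ n) (r : List Int) (c : Int) :
    r.foldl (fun (p : Int × Int) poltrona =>
        let zeros : Int := if poltrona = 0 then p.1 + 1 else 0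
        (zeros, if zeros ≥ n then p.2 + 1 else p.2)) ((0 : Int), c)
      = ((pvTz r : Int), c + (pvW r n : Int)) := by
  induction r using List.reverseRecOn with
  | nil =>
    have h0 : pvW [] n = 0 := by
      rw [pvW, PySem.List.pyRange_one_eq_nil (by simp; omega : ((([] : List Int).length : Int) - n + 1 ≤ 0))]
      rfl
    simp [pvTz, h0]
  | append_singleton r v ih =>
    rw [List.foldl_append, ih]
    simp only [List.foldl_cons, List.foldl_nil]
    rw [pvW_append r v n hn, pvTz_append r v]
    by_cases hv : v = 0
    · simp only [hv, if_true]
      by_cases hz : (pvTz r : Int) + 1 ≥ n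
      · have h1 : n ≤ ((pvTz r + 1 : Nat) : Int) := by push_cast; omega
        simp only [hz, if_true, if_pos h1]
        refine Prod.ext (by push_cast; ring) (by simp; ring)
      · have h1 : ¬ n ≤ ((pvTz r + 1 : Nat) : Int) := by push_cast; omega
        simp only [hz, if_false, if_neg h1]
        refine Prod.ext (by push_cast; ring) (by simp)
    · have hz : ¬ ((0:Int) ≥ n) := by omega
      have hz' : ¬ (n ≤ ((0:Nat) : Int)) := by omega
      simp [hv, hz]

theorem pv_rowA_eq (r : List Int) (n c : Int) :
    (PySem.List.pyRange 0 ((r.length : Int) - n + 1) 1).foldl (fun casos x =>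
        let verificador := (PySem.List.pyRange 0 n 1).foldl (fun v y =>
          if PySem.List.pyGetD r (x + y) 0 ≠ 0 then false else v) true
        if verificador = true then casos + 1 else casos) c
      = c + (pvW r n : Int) := by
  have hbody : ∀ (casos : Int), ∀ x ∈ PySem.List.pyRange 0 ((r.length : Int) - n + 1) 1,
      (let verificador := (PySem.List.pyRange 0 n 1).foldl (fun v y =>
          if PySem.List.pyGetD r (x + y) 0 ≠ 0 then false else v) true
       if verificador = true then casos + 1 else casos)
      = if (pvZwin r n x = true) then casos + 1 else casos := by
    intro casos x _
    have h1 : (PySem.List.pyRange 0 n 1).foldl (fun v y =>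
          if PySem.List.pyGetD r (x + y) 0 ≠ 0 then false else v) true
        = (PySem.List.pyRange 0 n 1).foldl (fun v y =>
          if (fun y => decide (PySem.List.pyGetD r (x + y) 0 ≠ 0)) y = true then false else v) true := by
      apply PySem.List.foldl_congr_mem
      intro acc y _
      by_cases h : PySem.List.pyGetD r (x + y) 0 ≠ 0 <;> simp [h]
    rw [h1, PySem.List.foldl_if_false_eq]
    simp [pvZwin]
  rw [PySem.List.foldl_congr_mem _ _ _ _ hbody,
      PySem.List.foldl_ite_add_one (fun x => pvZwin r n x = true)]
  simp [pvW]

theorem pv_A_rows (m : List (List Int)) (n : Int) :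
    tabuleiro m n = m.foldl (fun casos fileira =>
      (PySem.List.pyRange 0 ((fileira.length : Int) - n + 1) 1).foldl (fun casos x =>
        let verificador := (PySem.List.pyRange 0 n 1).foldl (fun v y =>
          if PySem.List.pyGetD fileira (x + y) 0 ≠ 0 then false else v) true
        if verificador = true then casos + 1 else casos) casos) 0 := by
  unfold tabuleiro
  exact PySem.List.foldl_pyRange_zero_pyGetD' m [] (fun casos fileira =>
    (PySem.List.pyRange 0 ((fileira.length : Int) - n + 1) 1).foldl (fun casos x =>
      let verificador := (PySem.List.pyRange 0 n 1).foldl (fun v y =>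
        if PySem.List.pyGetD fileira (x + y) 0 ≠ 0 then false else v) true
      if verificador = true then casos + 1 else casos) casos) 0

theorem pv_main (m : List (List Int)) (n : Int) (hn : 1 ≤ n) :
    tabuleiro m n = tabuleiro_alt m n := by
  rw [pv_A_rows, tabuleiro_alt]
  apply PySem.List.foldl_congr_mem
  intro c r _
  rw [pv_rowA_eq, pv_foldB n hn r c]

-- ===== VERDICT (by name: the statement is the Claim_ definition above) =====
theorem tabuleiro_spec : Claim_equal_tabuleiro := by
  intro matriz numero _ hpre
  unfold Spec_tabuleiro
  exact pv_main matriz numero hpre
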